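-- pv_equiv track=rewrite | github.com/IBM/MAX-Text-Summarizer | core/getpoint/convert.py | get_art_abs
-- ===== SOURCE A (Python) =====
-- END_TOKENS = frozenset(['.', '!', '?', '...', "'", "`", '"', ")"]) # acceptable ways to end a sentence
--
-- def fix_missing_period(line):
--   """Adds a period to a line that is missing a period"""
--   if "@highlight" in line: return line
--   if line=="": return line
--   if line[-1] in END_TOKENS: return line
--   return line + " ."
--
-- def get_art_abs(input_string):
--   lines = input_string.splitlines()
--   lines = [line.lower() for line in lines]
--   lines = [fix_missing_period(line) for line in lines]
--
--   article_lines = []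
--   highlights = []
--   next_is_highlight = False
--   for idx,line in enumerate(lines):
--     if line == "":
--       continue # no line
--     elif line.startswith("@highlight"):
--       next_is_highlight = True
--     elif next_is_highlight:
--       highlights.append(line)
--     else:
--       article_lines.append(line)
--
--   # To a string
--   article = ' '.join(article_lines)
--
--   return article
-- ===== SOURCE B (Python) =====
-- END_TOKENS = frozenset(['.', '!', '?', '...', "'", "`", '"', ")"]) # acceptable ways to end a sentence
--
-- def fix_missing_period(line):
--   """Adds a period to a line that is missing a period"""
--   if "@highlight" in line: return line
--   if line=="": return line
--   if line[-1] in END_TOKENS: return line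
--   return line + " ."
--
-- def get_art_abs(input_string):
--   # Staged decomposition: lowercase the lines, locate the cut index of the
--   # first '@highlight' line (fix_missing_period never alters a line's prefix,
--   # so the test can run on the unfixed line), slice the prefix, then filter
--   # and fix in one comprehension.  No stateful flag, no highlights list.
--   lines = [l.lower() for l in input_string.splitlines()]
--   cut = next((i for i, l in enumerate(lines) if l.startswith('@highlight')), len(lines))
--   return ' '.join(fix_missing_period(l) for l in lines[:cut] if l)
-- ===== Notes on version B (the rewrite author's own statement) =====
-- stated objective: idiomatic
-- what changed: Replaces A's stateful flag loop over fixed lines (with its dead highlights list) by staged passes: find the cut index of the first '@highlight' line on the unfixed lowered lines, slice that prefix, and filter-and-fix it in one join; correctness rests on fix_missing_period never changing a line's prefix or emptiness.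
import Mathlib
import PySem

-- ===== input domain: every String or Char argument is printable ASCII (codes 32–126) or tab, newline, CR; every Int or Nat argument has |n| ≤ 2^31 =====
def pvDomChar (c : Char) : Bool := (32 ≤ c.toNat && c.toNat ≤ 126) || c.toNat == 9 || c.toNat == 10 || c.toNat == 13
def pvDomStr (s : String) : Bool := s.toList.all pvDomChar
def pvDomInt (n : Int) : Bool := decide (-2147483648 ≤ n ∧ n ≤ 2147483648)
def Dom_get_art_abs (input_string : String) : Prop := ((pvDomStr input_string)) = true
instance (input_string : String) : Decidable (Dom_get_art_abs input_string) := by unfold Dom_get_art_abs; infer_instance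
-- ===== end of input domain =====

-- B replaces A's stateful flag loop (and its dead `highlights` list) by staged
-- passes: locate the cut index of the first '@highlight' line, slice, then
-- filter-and-fix that prefix; objective: idiomatic.

-- ===== PORT A =====

-- shared per-line helper, identical in Source A and Source B
def END_TOKENS : List String := [".", "!", "?", "...", "'", "`", "\"", ")"]

def fix_missing_period (line : String) : String :=
  if PySem.Str.isIn "@highlight" line then line
  else if line = "" then line
  else match PySem.Str.pyGet? line (-1) with   -- line[-1]; some _ since line ≠ ""
    | none => line
    | some c => if String.ofList [c] ∈ END_TOKENS then line
                else String.ofList (line.toList ++ [' ', '.'])   -- line + " ."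

-- one iteration of A's for-loop over the state (article_lines, highlights, next_is_highlight)
def pvStepA (s : List String × List String × Bool) (line : String) :
    List String × List String × Bool :=
  if line = "" then s
  else if PySem.Str.startswith line "@highlight" then (s.1, s.2.1, true)
  else if s.2.2 then (s.1, s.2.1 ++ [line], s.2.2)
  else (s.1 ++ [line], s.2.1, s.2.2)

def get_art_abs (input_string : String) : String :=
  let lines := PySem.Str.splitlines input_string
  let lines := lines.map (fun line => PySem.Str.lower line)
  let lines := lines.map (fun line => fix_missing_period line)
  let st := lines.foldl pvStepA ([], [], false)
  PySem.Str.join " " st.1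

-- ===== PORT B =====

-- Source B's `next((i for i, l in enumerate(lines) if l.startswith('@highlight')), len(lines))`
def pvCut : List String → Nat
  | [] => 0
  | l :: rest => if PySem.Str.startswith l "@highlight" then 0 else 1 + pvCut rest

def get_art_abs_alt (input_string : String) : String :=
  let lines := (PySem.Str.splitlines input_string).map (fun l => PySem.Str.lower l)
  let cut := pvCut lines
  -- lines[:cut] with 0 ≤ cut ≤ len lines is exactly List.take cut
  PySem.Str.join " "
    (((lines.take cut).filter (fun l => l ≠ "")).map (fun l => fix_missing_period l))

-- ===== PRECONDITION & SPEC =====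
def Spec_get_art_abs (input_string : String) (out : String) : Prop := out = get_art_abs_alt input_string
instance (input_string : String) (out : String) : Decidable (Spec_get_art_abs input_string out) := by unfold Spec_get_art_abs; infer_instance

-- ===== CLAIM =====
def Claim_equal_get_art_abs : Prop := ∀ (input_string : String), Dom_get_art_abs input_string → Spec_get_art_abs input_string (get_art_abs input_string)

-- ===== LEMMAS AND PROOFS =====

-- fix_missing_period never maps a non-empty line to the empty string
theorem pvFix_ne_empty (l : String) (h : l ≠ "") : fix_missing_period l ≠ "" := by
  unfold fix_missing_period
  split_ifs <;> try exact h
  match hg : PySem.Str.pyGet? l (-1) with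
  | none => simp; exact h
  | some c =>
    simp only [hg]
    split_ifs
    · exact h
    · intro hc
      have := congrArg String.toList hc
      simp at this

-- fix_missing_period never changes whether a line starts with '@highlight'
theorem pvFix_startswith (l : String) :
    PySem.Str.startswith (fix_missing_period l) "@highlight"
      = PySem.Str.startswith l "@highlight" := by
  unfold fix_missing_period
  split_ifs with h1 h2
  · rfl
  · rfl
  · match hg : PySem.Str.pyGet? l (-1) with
    | none => simp
    | some c =>
      simp only [hg]
      split_ifs
      · rfl
      · -- '@highlight' is not a substring of l, so neither string starts with it
        have hno : ¬ ("@highlight".toList <+: l.toList) := by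
          intro hp
          exact h1 ((PySem.Str.isIn_iff_infix _ _).mpr hp.isInfix)
        have hL : PySem.Str.startswith l "@highlight" = false := by
          rw [PySem.Str.startswith_eq]
          by_contra hb
          exact hno ((PySem.Chars.startswith_iff _ _).mp (by simpa using hb))
        rw [hL]
        rw [PySem.Str.startswith_eq]
        by_contra hb
        have hp : "@highlight".toList <+: (l.toList ++ [' ', '.']) := by
          have := (PySem.Chars.startswith_iff _ _).mp (by simpa using hb)
          simpa using this
        have hlen : "@highlight".toList.length = 10 := by decide
        by_cases hll : 10 ≤ l.toList.length
        · -- long line: the prefix lies inside l itself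
          apply hno
          have heq : "@highlight".toList = (l.toList ++ [' ', '.']).take 10 := by
            have := List.prefix_iff_eq_take.mp hp
            rwa [hlen] at this
          rw [List.take_append_of_le_length hll] at heq
          rw [heq]
          exact List.take_prefix _ _
        · -- short line: the prefix would contain the appended ' '
          rw [Nat.not_le] at hll
          have heq : "@highlight".toList = (l.toList ++ [' ', '.']).take 10 := by
            have := List.prefix_iff_eq_take.mp hp
            rwa [hlen] at this
          rw [List.take_append, List.take_of_length_le (le_of_lt hll)] at heq
          have hk : 1 ≤ 10 - l.toList.length := by omega
          have hsp : (' ' : Char) ∈ [' ', '.'].take (10 - l.toList.length) := by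
            match hm : 10 - l.toList.length, hk with
            | n + 1, _ => simp [List.take_succ_cons]
          have : (' ' : Char) ∈ "@highlight".toList := by
            rw [heq]; exact List.mem_append_right _ hsp
          simp at this

-- once the flag is true, A's article list never changes
theorem pvFoldA_true (ls : List String) (a h : List String) :
    (List.foldl pvStepA (a, h, true) ls).1 = a := by
  induction ls generalizing h with
  | nil => rfl
  | cons l ls ih =>
    simp only [List.foldl_cons, pvStepA]
    split_ifs <;> exact ih _

-- with the flag false, A's article list grows by exactly B's fixed, filtered prefix
theorem pvFoldA_false (ls : List String) (a h : List String) :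
    (List.foldl pvStepA (a, h, false) (ls.map (fun l => fix_missing_period l))).1
      = a ++ ((ls.take (pvCut ls)).filter (fun l => l ≠ "")).map (fun l => fix_missing_period l) := by
  induction ls generalizing a h with
  | nil => simp
  | cons l ls ih =>
    simp only [List.map_cons, List.foldl_cons, pvStepA, pvCut]
    by_cases hl : l = ""
    · subst hl
      have hf : fix_missing_period "" = "" := by decide
      have hs : PySem.Str.startswith "" "@highlight" = false := by decide
      rw [Nat.add_comm 1 (pvCut ls)]
      simp only [hf, hs]
      simp [ih a h]
    · have hf := pvFix_ne_empty l hl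
      simp only [if_neg hf]
      by_cases hsw : PySem.Str.startswith l "@highlight" = true
      · rw [pvFix_startswith, if_pos hsw, if_pos hsw]
        rw [pvFoldA_true]
        simp
      · rw [pvFix_startswith, if_neg hsw, if_neg hsw, if_neg (by decide : ¬ false = true)]
        rw [ih (a ++ [fix_missing_period l]) h, Nat.add_comm 1 (pvCut ls)]
        simp [List.take_succ_cons, hl]

-- ===== VERDICT =====
theorem get_art_abs_spec : Claim_equal_get_art_abs := by
  intro s _
  show get_art_abs s = get_art_abs_alt s
  simp only [get_art_abs, get_art_abs_alt]
  rw [pvFoldA_false ((PySem.Str.splitlines s).map (fun l => PySem.Str.lower l)) [] []]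
  rfl
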